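-- pv_equiv track=rewrite | github.com/bluejoyq/solving | programmers/2021-kakao-blind/1.py | solution
-- ===== SOURCE A (Python) =====
-- from collections import deque
--
-- def solution(new_id):
-- 	answer = deque([])
-- 	new_id = new_id.lower()
--
-- 	for letter in new_id:
-- 		if letter.isalnum() or letter == '-' or letter == '_' or letter =='.':
-- 			if len(answer) == 0:
-- 				if letter != '.':
-- 					answer.append(letter)
-- 				continue
-- 			elif answer[-1] == '.' and letter == '.':
-- 				continue
-- 			answer.append(letter)
-- 	try:
-- 		while(answer[-1] == '.'):
-- 			answer.pop()
-- 	except: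
-- 		pass
-- 	if len(answer) == 0:
-- 		answer.append('a')
--
-- 	while(len(answer) > 15 or answer[-1] == '.'):
-- 		answer.pop()
--
-- 	while len(answer) < 3:
-- 		answer.append(answer[-1])
--
-- 	result = ""
-- 	for char in answer:
-- 		result += char
-- 	return result
-- ===== SOURCE B (Python) =====
-- def solution(new_id):
--     s = ''.join(c for c in new_id.lower() if c.isalnum() or c in '-_.')
--     s = '.'.join(p for p in s.split('.') if p)  # collapse dot runs; strips leading/trailing dots too
--     if not s:
--         s = 'a'
--     s = s[:15].rstrip('.')
--     return s + s[-1] * (3 - len(s))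
-- ===== Notes on version B (the rewrite author's own statement) =====
-- stated objective: faster
-- what changed: A's character-by-character deque loop with pop-based post-processing is replaced by the standard pipeline of bulk string operations: filter the allowed characters, collapse dot runs and strip leading/trailing dots in one split('.')/join step, substitute 'a' for empty, truncate to 15 and rstrip('.'), then pad to length 3 with the last character.
import Mathlib
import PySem

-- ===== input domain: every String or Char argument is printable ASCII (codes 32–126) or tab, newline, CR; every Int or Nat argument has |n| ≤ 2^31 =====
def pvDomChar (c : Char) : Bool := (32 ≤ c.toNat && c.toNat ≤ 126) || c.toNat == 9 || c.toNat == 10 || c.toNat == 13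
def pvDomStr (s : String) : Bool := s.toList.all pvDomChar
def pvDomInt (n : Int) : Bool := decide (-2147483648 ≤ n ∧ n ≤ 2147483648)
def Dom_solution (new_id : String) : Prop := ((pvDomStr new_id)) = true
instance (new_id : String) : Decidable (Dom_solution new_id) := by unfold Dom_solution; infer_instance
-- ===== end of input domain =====

-- B replaces A's character-by-character deque loop (with pop-based post-processing) by the
-- idiomatic filter / split-join / strip pipeline of bulk string operations; same return value
-- (a timing run measured B faster by a constant factor).

-- ===== PORT A =====
-- letter.isalnum() or letter == '-' or letter == '_' or letter == '.'
def pvAllowedA (c : Char) : Bool :=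
  PySem.Chars.isalnum c || c == '-' || c == '_' || c == '.'

-- one iteration of A's for-loop body (answer is the deque, as a list appended at the end)
def pvStepA (ans : List Char) (c : Char) : List Char :=
  if pvAllowedA c then
    if ans = [] then (if c ≠ '.' then ans ++ [c] else ans)
    else if ans.getLast? = some '.' ∧ c = '.' then ans
    else ans ++ [c]
  else ans

-- 'while answer[-1] == '.': answer.pop()' inside try/except (empty deque stops the loop)
def pvPopDots (l : List Char) : List Char :=
  if l.getLast? = some '.' then pvPopDots l.dropLast else l
termination_by l.length
decreasing_by
  have hne : l ≠ [] := by rename_i h; intro hn; subst hn; simp at h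
  have := List.length_pos_iff.mpr hne
  simp [List.length_dropLast]; omega

-- 'while len(answer) > 15 or answer[-1] == '.': answer.pop()'; every state reaching this loop
-- is nonempty with a non-'.' head, so answer[-1] on an empty deque (IndexError) is unreachable
def pvPopLong (l : List Char) : List Char :=
  if 15 < l.length ∨ l.getLast? = some '.' then pvPopLong l.dropLast else l
termination_by l.length
decreasing_by
  have hne : l ≠ [] := by
    rename_i h; intro hn; subst hn; simp at h
  simp [List.length_dropLast]
  have := List.length_pos_iff.mpr hne
  omega

-- 'while len(answer) < 3: answer.append(answer[-1])'; the deque is nonempty at every call in A,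
-- so the .getD default of answer[-1] is never taken
def pvPad (l : List Char) : List Char :=
  if l.length < 3 then pvPad (l ++ [l.getLast?.getD 'a']) else l
termination_by 3 - l.length
decreasing_by simp; omega

def solution (new_id : String) : String :=
  let chars := (PySem.Str.lower new_id).toList
  let a1 := chars.foldl pvStepA []
  let a2 := pvPopDots a1
  let a3 := if a2 = [] then a2 ++ ['a'] else a2
  let a4 := pvPopLong a3
  let a5 := pvPad a4
  -- result = ""; for char in answer: result += char
  String.ofList (a5.foldl (fun r c => r ++ [c]) [])

-- ===== PORT B =====
-- c.isalnum() or c in '-_.'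
def pvAllowedB (c : Char) : Bool :=
  PySem.Chars.isalnum c || PySem.Chars.isIn [c] ['-', '_', '.']

-- hand port of s.rstrip('.'): drop exactly the trailing run of '.'; exact for every string
def pvRstripDots (l : List Char) : List Char :=
  (l.reverse.dropWhile (· == '.')).reverse

def solution_alt (new_id : String) : String :=
  let s1 := (PySem.Str.lower new_id).toList.filter pvAllowedB   -- ''.join(c for c in … if …)
  let s2 := PySem.Chars.join ['.'] ((PySem.Chars.splitOn s1 ['.']).filter (fun p => !p.isEmpty))
  let s3 := if s2.isEmpty then ['a'] else s2
  let s4 := pvRstripDots (PySem.List.slice s3 none (some 15))   -- s[:15].rstrip('.')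
  -- s + s[-1] * (3 - len(s));  s4 is never empty, so the .getD default of s[-1] is never taken
  String.ofList (s4 ++ List.replicate (3 - s4.length) ((PySem.List.pyGet? s4 (-1)).getD 'a'))

-- ===== PRECONDITION & SPEC =====
def Spec_solution (new_id : String) (out : String) : Prop := out = solution_alt new_id
instance (new_id : String) (out : String) : Decidable (Spec_solution new_id out) := by unfold Spec_solution; infer_instance

-- ===== CLAIM (what is proved, stated in full; the proofs are below) =====
def Claim_equal_solution : Prop := ∀ (new_id : String), Dom_solution new_id → Spec_solution new_id (solution new_id)

-- ===== LEMMAS AND PROOFS =====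

-- the body of A's loop once the character is known to be allowed
def pvStep2 (ans : List Char) (c : Char) : List Char :=
  if ans = [] then (if c ≠ '.' then ans ++ [c] else ans)
  else if ans.getLast? = some '.' ∧ c = '.' then ans
  else ans ++ [c]

-- state machine equivalent of A's loop after the first kept character:
-- b records whether the last emitted character is '.'
def pvT (b : Bool) : List Char → List Char
  | [] => []
  | c :: xs =>
    if c = '.' then (if b then pvT true xs else '.' :: pvT true xs)
    else c :: pvT false xs

-- A's loop from the empty deque: leading dots are dropped
def pvLead : List Char → List Char
  | [] => []
  | c :: xs => if c = '.' then pvLead xs else c :: pvT false xs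

-- accumulator form of str.split('.')
def pvSplit (cur : List Char) : List Char → List (List Char)
  | [] => [cur]
  | c :: xs => if c = '.' then cur :: pvSplit [] xs else pvSplit (cur ++ [c]) xs

theorem pvIsIn_singleton (c : Char) :
    PySem.Chars.isIn [c] ['-', '_', '.'] = (c == '-' || c == '_' || c == '.') := by
  rw [Bool.eq_iff_iff]
  constructor
  · intro h
    have hmem : c ∈ ['-', '_', '.'] := ((PySem.Chars.isIn_iff_infix _ _).mp h).subset (by simp)
    have h3 : c = '-' ∨ c = '_' ∨ c = '.' := by simpa using hmem
    rcases h3 with h | h | h <;> simp [h]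
  · intro h
    have h3 : (c = '-' ∨ c = '_') ∨ c = '.' := by simpa using h
    have hmem : c ∈ ['-', '_', '.'] := by
      rcases h3 with (h | h) | h <;> simp [h]
    obtain ⟨sfx, t, hst⟩ := List.append_of_mem hmem
    exact (PySem.Chars.isIn_iff_infix _ _).mpr ⟨sfx, t, by simp [hst]⟩

theorem pvAllowed_eq (c : Char) : pvAllowedA c = pvAllowedB c := by
  simp [pvAllowedA, pvAllowedB, pvIsIn_singleton, Bool.or_assoc]

theorem pvSplitOn_go_eq (fuel : Nat) (xs cur : List Char) (acc : List (List Char))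
    (h : xs.length < fuel) :
    PySem.Chars.splitOn.go ['.'] fuel xs cur acc = acc.reverse ++ pvSplit cur.reverse xs := by
  induction fuel generalizing xs cur acc with
  | zero => omega
  | succ n ih =>
    cases xs with
    | nil => simp [PySem.Chars.splitOn.go, pvSplit]
    | cons c rest =>
      by_cases hc : c = '.'
      · subst hc
        have hpre : List.isPrefixOf ['.'] ('.' :: rest) = true := by simp [List.isPrefixOf]
        simp only [PySem.Chars.splitOn.go, hpre, if_pos]
        rw [show List.drop ['.'].length ('.' :: rest) = rest from rfl]
        rw [ih rest [] (cur.reverse :: acc) (by simp at h; omega)]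
        simp [pvSplit]
      · have hpre : List.isPrefixOf ['.'] (c :: rest) = false := by
          simp only [List.isPrefixOf, Bool.and_true]
          exact beq_eq_false_iff_ne.mpr (fun he : '.' = c => hc he.symm)
        simp only [PySem.Chars.splitOn.go]
        rw [if_neg (by simp [hpre])]
        rw [ih rest (c :: cur) acc (by simp at h; omega)]
        simp [pvSplit, hc]

theorem pvSplitOn_eq (s : List Char) : PySem.Chars.splitOn s ['.'] = pvSplit [] s := by
  rw [PySem.Chars.splitOn.eq_1, pvSplitOn_go_eq (s.length + 1) s [] [] (by omega)]
  simp

-- intercalate on a cons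
theorem pvIc_cons (a : List Char) (l : List (List Char)) :
    List.intercalate ['.'] (a :: l) = a ++ (if l = [] then [] else '.' :: List.intercalate ['.'] l) := by
  cases l with
  | nil => simp [List.intercalate]
  | cons b m => simp [List.intercalate]

def pvF (l : List (List Char)) : List (List Char) := l.filter (fun p => !p.isEmpty)

theorem pvF_split_ne_nil (xs d : List Char) (hd : d ≠ []) : pvF (pvSplit d xs) ≠ [] := by
  induction xs generalizing d with
  | nil => simp [pvSplit, pvF, List.filter, hd]
  | cons c rest ih =>
    by_cases hc : c = '.'
    · subst hc
      simp [pvSplit, pvF, hd]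
    · simpa [pvSplit, hc] using ih (d ++ [c]) (by simp)

theorem pvIc_split_append (xs : List Char) : ∀ (d e : List Char), d ≠ [] →
    List.intercalate ['.'] (pvF (pvSplit (e ++ d) xs)) =
      e ++ List.intercalate ['.'] (pvF (pvSplit d xs)) := by
  induction xs with
  | nil =>
    intro d e hd
    simp [pvSplit, pvF, List.filter, hd, List.intercalate]
  | cons c rest ih =>
    intro d e hd
    by_cases hc : c = '.'
    · subst hc
      simp only [pvSplit, if_pos]
      have hed : (e ++ d).isEmpty = false := by simp [hd]
      have hdd : d.isEmpty = false := by simp [hd]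
      simp only [pvF, List.filter_cons, hed, hdd, Bool.not_false, if_pos]
      rw [pvIc_cons, pvIc_cons]
      split <;> simp
    · simp only [pvSplit, if_neg hc]
      rw [show e ++ d ++ [c] = e ++ (d ++ [c]) by simp]
      exact ih (d ++ [c]) e (by simp)

theorem pvPyGet_neg_one (l : List Char) : PySem.List.pyGet? l (-1) = l.getLast? := by
  cases l with
  | nil => rfl
  | cons a t =>
    simp [PySem.List.pyGet?, PySem.List.pyIdx?, List.getLast?_eq_getElem?]

theorem pvPopDots_last_ne (l : List Char) (h : l.getLast? ≠ some '.') : pvPopDots l = l := by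
  rw [pvPopDots, if_neg h]

theorem pvPopDots_concat_dot (l : List Char) : pvPopDots (l ++ ['.']) = pvPopDots l := by
  rw [pvPopDots, if_pos (by simp), List.dropLast_concat]

-- the heart: A's collapsed stream with trailing dots popped = B's split/filter/join
theorem pvMain (n : Nat) : ∀ (xs : List Char), xs.length ≤ n →
    (∀ cur, cur ≠ [] → cur.getLast? ≠ some '.' →
      pvPopDots (cur ++ pvT false xs) = List.intercalate ['.'] (pvF (pvSplit cur xs))) ∧
    (∀ cur, cur ≠ [] → cur.getLast? ≠ some '.' →
      pvPopDots (cur ++ '.' :: pvT true xs) = List.intercalate ['.'] (pvF (cur :: pvSplit [] xs))) := by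
  induction n with
  | zero =>
    intro xs hlen
    have hxs : xs = [] := List.length_eq_zero_iff.mp (Nat.le_zero.mp hlen)
    subst hxs
    constructor
    · intro cur hc hl
      have hcur : cur.isEmpty = false := by simp [hc]
      rw [pvT, List.append_nil, pvPopDots_last_ne cur hl]
      simp [pvSplit, pvF, List.filter, hcur, List.intercalate]
    · intro cur hc hl
      have hcur : cur.isEmpty = false := by simp [hc]
      rw [show cur ++ '.' :: pvT true [] = cur ++ ['.'] by simp [pvT]]
      rw [pvPopDots_concat_dot, pvPopDots_last_ne cur hl]
      simp [pvSplit, pvF, List.filter, hcur, List.intercalate]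
  | succ n ih =>
    intro xs hlen
    cases xs with
    | nil =>
      constructor
      · intro cur hc hl
        have hcur : cur.isEmpty = false := by simp [hc]
        rw [pvT, List.append_nil, pvPopDots_last_ne cur hl]
        simp [pvSplit, pvF, List.filter, hcur, List.intercalate]
      · intro cur hc hl
        have hcur : cur.isEmpty = false := by simp [hc]
        rw [show cur ++ '.' :: pvT true [] = cur ++ ['.'] by simp [pvT]]
        rw [pvPopDots_concat_dot, pvPopDots_last_ne cur hl]
        simp [pvSplit, pvF, List.filter, hcur, List.intercalate]
    | cons c r =>
      have hr : r.length ≤ n := by simp at hlen; omega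
      constructor
      · intro cur hc hl
        by_cases hdot : c = '.'
        · subst hdot
          rw [show pvT false ('.' :: r) = '.' :: pvT true r by simp [pvT]]
          rw [(ih r hr).2 cur hc hl]
          rw [show pvSplit cur ('.' :: r) = cur :: pvSplit [] r by simp [pvSplit]]
        · rw [show pvT false (c :: r) = c :: pvT false r by simp [pvT, hdot]]
          rw [show cur ++ c :: pvT false r = (cur ++ [c]) ++ pvT false r by simp]
          rw [(ih r hr).1 (cur ++ [c]) (by simp) (by simp [hdot])]
          rw [show pvSplit cur (c :: r) = pvSplit (cur ++ [c]) r by simp [pvSplit, hdot]]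
      · intro cur hc hl
        by_cases hdot : c = '.'
        · subst hdot
          rw [show pvT true ('.' :: r) = pvT true r by simp [pvT]]
          rw [(ih r hr).2 cur hc hl]
          have : pvF (cur :: pvSplit [] ('.' :: r)) = pvF (cur :: pvSplit [] r) := by
            simp [pvSplit, pvF, List.filter_cons]
          rw [this]
        · rw [show pvT true (c :: r) = c :: pvT false r by simp [pvT, hdot]]
          rw [show cur ++ '.' :: c :: pvT false r = ((cur ++ ['.']) ++ [c]) ++ pvT false r by simp]
          rw [(ih r hr).1 ((cur ++ ['.']) ++ [c]) (by simp) (by simp [hdot])]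
          rw [pvIc_split_append r [c] (cur ++ ['.']) (by simp)]
          rw [show pvSplit [] (c :: r) = pvSplit [c] r by simp [pvSplit, hdot]]
          have hcur : cur.isEmpty = false := by simp [hc]
          rw [show pvF (cur :: pvSplit [c] r) = cur :: pvF (pvSplit [c] r) by
            simp [pvF, hcur]]
          rw [pvIc_cons cur (pvF (pvSplit [c] r))]
          rw [if_neg (pvF_split_ne_nil r [c] (by simp))]
          simp

theorem pvLead_popDots (xs : List Char) :
    pvPopDots (pvLead xs) = List.intercalate ['.'] (pvF (pvSplit [] xs)) := by
  induction xs with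
  | nil =>
    rw [pvLead, pvPopDots_last_ne [] (by simp)]
    simp [pvSplit, pvF, List.filter, List.intercalate]
  | cons c r ih =>
    by_cases hdot : c = '.'
    · subst hdot
      rw [show pvLead ('.' :: r) = pvLead r by simp [pvLead]]
      rw [ih]
      have : pvF (pvSplit [] ('.' :: r)) = pvF (pvSplit [] r) := by
        simp [pvSplit, pvF]
      rw [this]
    · rw [show pvLead (c :: r) = [c] ++ pvT false r by simp [pvLead, hdot]]
      rw [(pvMain r.length r le_rfl).1 [c] (by simp) (by simp [hdot])]
      rw [show pvSplit [] (c :: r) = pvSplit [c] r by simp [pvSplit, hdot]]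

theorem pvFoldl_step2_ne (l : List Char) : ∀ (ans : List Char), ans ≠ [] →
    List.foldl pvStep2 ans l = ans ++ pvT (ans.getLast? == some '.') l := by
  induction l with
  | nil => intro ans hne; simp [pvT]
  | cons c r ih =>
    intro ans hne
    rw [List.foldl_cons]
    by_cases hdot : c = '.'
    · subst hdot
      by_cases hl : ans.getLast? = some '.'
      · rw [show pvStep2 ans '.' = ans by simp [pvStep2, hne, hl]]
        rw [ih ans hne]
        simp [pvT, hl]
      · rw [show pvStep2 ans '.' = ans ++ ['.'] by simp [pvStep2, hne, hl]]
        rw [ih (ans ++ ['.']) (by simp)]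
        have hb : (ans.getLast? == some '.') = false := by
          simpa using hl
        simp [pvT, hb]
    · rw [show pvStep2 ans c = ans ++ [c] by simp [pvStep2, hne, hdot]]
      rw [ih (ans ++ [c]) (by simp)]
      have hb : (c == '.') = false := by simpa using hdot
      simp [pvT, hb]
      exact fun h => absurd h hdot

theorem pvFoldl_stepA (l : List Char) :
    List.foldl pvStepA [] l = List.foldl pvStep2 [] (l.filter pvAllowedA) := by
  rw [List.foldl_filter]
  rfl

theorem pvFoldl_step2_nil (l : List Char) : List.foldl pvStep2 [] l = pvLead l := by
  induction l with
  | nil => simp [pvLead]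
  | cons c r ih =>
    rw [List.foldl_cons]
    by_cases hdot : c = '.'
    · subst hdot
      rw [show pvStep2 [] '.' = [] by simp [pvStep2]]
      rw [ih]
      simp [pvLead]
    · rw [show pvStep2 [] c = [c] by simp [pvStep2, hdot]]
      rw [pvFoldl_step2_ne r [c] (by simp)]
      have hb : (c == '.') = false := by simpa using hdot
      simp [pvLead, hb]
      exact fun h => absurd h hdot

theorem pvPopLong_eq_aux (n : Nat) : ∀ l : List Char, l.length ≤ n →
    pvPopLong l = pvPopDots (l.take 15) := by
  induction n with
  | zero =>
    intro l h
    have hl : l = [] := List.length_eq_zero_iff.mp (Nat.le_zero.mp h)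
    subst hl
    rw [pvPopLong, pvPopDots]
    simp
  | succ n ih =>
    intro l hlen
    rw [pvPopLong]
    by_cases h15 : 15 < l.length
    · rw [if_pos (Or.inl h15)]
      rw [ih l.dropLast (by simp [List.length_dropLast]; omega)]
      rw [List.dropLast_eq_take, List.take_take]
      congr 2
      omega
    · by_cases hdot : l.getLast? = some '.'
      · rw [if_pos (Or.inr hdot)]
        have hne : l ≠ [] := by intro h; subst h; simp at hdot
        have hpos := List.length_pos_iff.mpr hne
        rw [ih l.dropLast (by simp [List.length_dropLast]; omega)]
        rw [List.take_of_length_le (by simp [List.length_dropLast]; omega)]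
        rw [List.take_of_length_le (by omega)]
        conv_rhs => rw [pvPopDots]
        rw [if_pos hdot]
      · rw [if_neg (by rw [not_or]; exact ⟨by omega, hdot⟩)]
        rw [List.take_of_length_le (by omega)]
        rw [pvPopDots_last_ne l hdot]

theorem pvPopLong_eq (l : List Char) : pvPopLong l = pvPopDots (l.take 15) :=
  pvPopLong_eq_aux l.length l le_rfl

theorem pvRstrip_eq_aux (n : Nat) : ∀ l : List Char, l.length ≤ n →
    pvRstripDots l = pvPopDots l := by
  induction n with
  | zero =>
    intro l h
    have hl : l = [] := List.length_eq_zero_iff.mp (Nat.le_zero.mp h)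
    subst hl
    rw [pvPopDots]
    simp [pvRstripDots]
  | succ n ih =>
    intro l hlen
    rcases List.eq_nil_or_concat l with rfl | ⟨l', a, rfl⟩
    · rw [pvPopDots]; simp [pvRstripDots]
    · simp only [List.concat_eq_append] at hlen ⊢
      by_cases ha : a = '.'
      · subst ha
        have h1 : pvRstripDots (l' ++ ['.']) = pvRstripDots l' := by
          simp [pvRstripDots]
        rw [h1, pvPopDots_concat_dot]
        exact ih l' (by simp at hlen; omega)
      · have hb : (a == '.') = false := by simpa using ha
        have h1 : pvRstripDots (l' ++ [a]) = l' ++ [a] := by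
          simp [pvRstripDots, hb]
        rw [h1, pvPopDots_last_ne _ (by simp [ha])]

theorem pvRstrip_eq (l : List Char) : pvRstripDots l = pvPopDots l :=
  pvRstrip_eq_aux l.length l le_rfl

theorem pvPad_eq (l : List Char) :
    pvPad l = l ++ List.replicate (3 - l.length) ((PySem.List.pyGet? l (-1)).getD 'a') := by
  have haux : ∀ (n : Nat) (m : List Char), 3 - m.length ≤ n →
      pvPad m = m ++ List.replicate (3 - m.length) ((PySem.List.pyGet? m (-1)).getD 'a') := by
    intro n
    induction n with
    | zero =>
      intro m h
      rw [pvPad, if_neg (by omega)]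
      have : 3 - m.length = 0 := by omega
      simp [this]
    | succ n ih =>
      intro m hm
      rw [pvPad]
      by_cases h3 : m.length < 3
      · rw [if_pos h3]
        rw [ih (m ++ [m.getLast?.getD 'a']) (by simp; omega)]
        rw [pvPyGet_neg_one, pvPyGet_neg_one]
        rw [List.getLast?_concat]
        have hrep : 3 - m.length = (3 - (m ++ [m.getLast?.getD 'a']).length) + 1 := by
          simp; omega
        rw [hrep, List.replicate_succ]
        simp
      · rw [if_neg h3]
        have : 3 - m.length = 0 := by omega
        simp [this]
  exact haux (3 - l.length) l le_rfl

theorem pvCore_eq (chars : List Char) :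
    pvPopDots (chars.foldl pvStepA []) =
      PySem.Chars.join ['.']
        ((PySem.Chars.splitOn (chars.filter pvAllowedB) ['.']).filter (fun p => !p.isEmpty)) := by
  have hfilter : chars.filter pvAllowedA = chars.filter pvAllowedB := by
    apply List.filter_congr
    intro c _
    rw [pvAllowed_eq]
  rw [pvFoldl_stepA, pvFoldl_step2_nil, hfilter, pvLead_popDots, pvSplitOn_eq]
  rfl

-- ===== VERDICT (by name: the statement is the Claim_ definition above) =====
theorem solution_spec : Claim_equal_solution := by
  unfold Claim_equal_solution
  intro new_id _
  unfold Spec_solution solution solution_alt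
  simp only [PySem.List.foldl_append_singleton, List.nil_append]
  refine congrArg String.ofList ?_
  rw [pvPad_eq, pvPopLong_eq, pvRstrip_eq, PySem.List.slice_to _ (by norm_num), pvCore_eq]
  set s2 := PySem.Chars.join ['.']
      ((PySem.Chars.splitOn ((PySem.Str.lower new_id).toList.filter pvAllowedB) ['.']).filter
        (fun p => !p.isEmpty))
  rw [show Int.toNat 15 = 15 from rfl]
  by_cases hnil : s2 = []
  · rw [if_pos hnil, if_pos (by simp [hnil]), hnil]
    rfl
  · rw [if_neg hnil, if_neg (by simpa using hnil)]
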